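-- pv_equiv track=rewrite | github.com/IDUclub/genbuilder_api | app/logic/postprocessing/shapes_library.py | transform_offsets
-- ===== SOURCE A (Python) =====
-- from typing import Dict, List, Tuple
--
-- def transform_offsets(
--     offsets: List[Tuple[int, int]], rot_k: int, mirror: bool
-- ) -> List[Tuple[int, int]]:
--     out: List[Tuple[int, int]] = []
--     for (dr, dc) in offsets:
--         r, c = dr, dc
--         for _ in range(rot_k % 4):
--             r, c = c, -r
--         if mirror:
--             c = -c
--         out.append((r, c))
--     minr = min(r for r, _ in out)
--     minc = min(c for _, c in out)
--     return [(r - minr, c - minc) for (r, c) in out]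
-- ===== SOURCE B (Python) =====
-- def transform_offsets(offsets, rot_k, mirror):
--     # Normalize via the bounding box of the ORIGINAL offsets: the min row/col of the
--     # transformed points is a corner of the original bbox, so no intermediate
--     # transformed list is ever built.
--     rs = [r for r, _ in offsets]
--     cs = [c for _, c in offsets]
--     minr, maxr, minc, maxc = min(rs), max(rs), min(cs), max(cs)
--     k = rot_k % 4
--     if k == 0:
--         return [(r - minr, maxc - c if mirror else c - minc) for r, c in offsets]
--     if k == 1:
--         return [(c - minc, r - minr if mirror else maxr - r) for r, c in offsets]
--     if k == 2:
--         return [(maxr - r, c - minc if mirror else maxc - c) for r, c in offsets]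
--     return [(maxc - c, maxr - r if mirror else r - minr) for r, c in offsets]
-- ===== Notes on version B (the rewrite author's own statement) =====
-- stated objective: alternative
-- what changed: B never builds the transformed point list: it computes the bounding box of the original offsets in one pass and, for each residue of rot_k mod 4, emits each normalized point directly as a closed-form difference against the appropriate bbox corner, so the min-over-transformed-points scans disappear.
import Mathlib
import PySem

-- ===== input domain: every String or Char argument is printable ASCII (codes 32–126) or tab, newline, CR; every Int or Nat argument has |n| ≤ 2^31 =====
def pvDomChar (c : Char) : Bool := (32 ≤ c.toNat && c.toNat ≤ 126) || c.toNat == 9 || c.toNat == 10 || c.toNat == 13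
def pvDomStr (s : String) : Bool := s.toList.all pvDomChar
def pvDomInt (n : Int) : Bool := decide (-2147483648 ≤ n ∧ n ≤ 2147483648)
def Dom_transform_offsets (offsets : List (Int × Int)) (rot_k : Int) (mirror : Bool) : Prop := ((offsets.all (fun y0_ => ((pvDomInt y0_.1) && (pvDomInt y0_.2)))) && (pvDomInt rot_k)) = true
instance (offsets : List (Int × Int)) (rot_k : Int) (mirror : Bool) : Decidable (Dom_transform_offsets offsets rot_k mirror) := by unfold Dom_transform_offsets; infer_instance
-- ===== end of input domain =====

-- B normalizes against the bounding box of the ORIGINAL offsets (computed once) and emits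
-- each point as a closed-form difference per residue of rot_k mod 4, never building the
-- transformed list that A scans for its minima (alternative decomposition, same cost).

-- ===== PORT A =====
-- the inner 'for _ in range(rot_k % 4): r, c = c, -r' loop
def pvRotLoop : Nat → Int × Int → Int × Int
  | 0, p => p
  | n + 1, p => pvRotLoop n (p.2, -p.1)

def transform_offsets (offsets : List (Int × Int)) (rot_k : Int) (mirror : Bool) : List (Int × Int) :=
  let out := offsets.foldl (fun acc p =>
    let rc := pvRotLoop (PySem.Int.mod rot_k 4).toNat p
    let rc := if mirror then (rc.1, -rc.2) else rc
    acc ++ [rc]) []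
  match PySem.List.min? (out.map Prod.fst) (fun x => x),
        PySem.List.min? (out.map Prod.snd) (fun x => x) with
  | some minr, some minc => out.map (fun rc => (rc.1 - minr, rc.2 - minc))
  | _, _ => []   -- unreachable inside Pre_ (Python raises ValueError on empty offsets)

-- ===== PORT B =====
def transform_offsets_alt (offsets : List (Int × Int)) (rot_k : Int) (mirror : Bool) : List (Int × Int) :=
  let rs := offsets.map (fun p => p.1)
  let cs := offsets.map (fun p => p.2)
  match PySem.List.min? rs (fun x => x) with
  | none => []   -- unreachable inside Pre_ (min() of empty raises in Python)
  | some minr =>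
  match PySem.List.max? rs (fun x => x) with
  | none => []
  | some maxr =>
  match PySem.List.min? cs (fun x => x) with
  | none => []
  | some minc =>
  match PySem.List.max? cs (fun x => x) with
  | none => []
  | some maxc =>
    let k := PySem.Int.mod rot_k 4
    if k = 0 then
      offsets.map (fun p => (p.1 - minr, if mirror then maxc - p.2 else p.2 - minc))
    else if k = 1 then
      offsets.map (fun p => (p.2 - minc, if mirror then p.1 - minr else maxr - p.1))
    else if k = 2 then
      offsets.map (fun p => (maxr - p.1, if mirror then p.2 - minc else maxc - p.2))
    else
      offsets.map (fun p => (maxc - p.2, if mirror then maxr - p.1 else p.1 - minr))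

-- ===== PRECONDITION & SPEC =====
-- A raises ValueError (min() of an empty sequence) on the empty list; excluded.
def Pre_transform_offsets (offsets : List (Int × Int)) (rot_k : Int) (mirror : Bool) : Prop :=
  offsets ≠ []
instance (offsets : List (Int × Int)) (rot_k : Int) (mirror : Bool) : Decidable (Pre_transform_offsets offsets rot_k mirror) := by unfold Pre_transform_offsets; infer_instance

def pvWitness_transform_offsets : (List (Int × Int)) × Int × Bool := ([(1, 2), (-3, 0)], 5, true)

def Spec_transform_offsets (offsets : List (Int × Int)) (rot_k : Int) (mirror : Bool) (out : List (Int × Int)) : Prop := out = transform_offsets_alt offsets rot_k mirror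
instance (offsets : List (Int × Int)) (rot_k : Int) (mirror : Bool) (out : List (Int × Int)) : Decidable (Spec_transform_offsets offsets rot_k mirror out) := by unfold Spec_transform_offsets; infer_instance

-- ===== CLAIM (what is proved, stated in full; the proofs are below) =====
def Claim_equal_transform_offsets : Prop := ∀ (offsets : List (Int × Int)) (rot_k : Int) (mirror : Bool), Dom_transform_offsets offsets rot_k mirror → Pre_transform_offsets offsets rot_k mirror → Spec_transform_offsets offsets rot_k mirror (transform_offsets offsets rot_k mirror)

-- ===== LEMMAS AND PROOFS =====

theorem pv_foldl_append_map {α β : Type} (g : α → β) (l : List α) (init : List β) :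
    l.foldl (fun acc p => acc ++ [g p]) init = init ++ l.map g := by
  induction l generalizing init with
  | nil => simp
  | cons x t ih => simp [List.foldl, ih]

theorem pv_mod4_cases (n : Int) :
    PySem.Int.mod n 4 = 0 ∨ PySem.Int.mod n 4 = 1 ∨ PySem.Int.mod n 4 = 2 ∨ PySem.Int.mod n 4 = 3 := by
  rw [PySem.Int.mod_eq_emod_of_pos (by norm_num)]
  omega

-- min of a negated list is minus the max of the list (foldl form)
theorem pv_foldl_min_neg (l : List Int) (x : Int) :
    (l.map (fun y => -y)).foldl min (-x) = -(l.foldl max x) := by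
  induction l generalizing x with
  | nil => simp
  | cons a t ih =>
    simp only [List.map_cons, List.foldl_cons, min_neg_neg]
    exact ih (max x a)

-- min of negated first/second coordinates = minus the max of them
theorem pv_min_neg_fst (t : List (Int × Int)) (x : Int) :
    (t.map (fun p : Int × Int => -p.1)).foldl min (-x) = -((t.map (fun p : Int × Int => p.1)).foldl max x) := by
  rw [show t.map (fun p : Int × Int => -p.1) = (t.map (fun p : Int × Int => p.1)).map (fun y => -y) by
        simp, pv_foldl_min_neg]

theorem pv_min_neg_snd (t : List (Int × Int)) (x : Int) :
    (t.map (fun p : Int × Int => -p.2)).foldl min (-x) = -((t.map (fun p : Int × Int => p.2)).foldl max x) := by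
  rw [show t.map (fun p : Int × Int => -p.2) = (t.map (fun p : Int × Int => p.2)).map (fun y => -y) by
        simp, pv_foldl_min_neg]

theorem transform_offsets_eq (offsets : List (Int × Int)) (rot_k : Int) (mirror : Bool)
    (h : offsets ≠ []) :
    transform_offsets offsets rot_k mirror = transform_offsets_alt offsets rot_k mirror := by
  obtain ⟨a, t, rfl⟩ : ∃ a t, offsets = a :: t := by
    cases offsets with
    | nil => exact absurd rfl h
    | cons a t => exact ⟨a, t, rfl⟩
  unfold transform_offsets transform_offsets_alt
  rw [pv_foldl_append_map, List.nil_append]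
  rcases pv_mod4_cases rot_k with hk | hk | hk | hk <;> rw [hk] <;> cases mirror <;>
  simp only [List.map_cons, List.map_map, Function.comp_def, pvRotLoop,
    Int.toNat_zero, Int.toNat_one, show ((2 : Int).toNat = 2) from rfl,
    show ((3 : Int).toNat = 3) from rfl, Bool.false_eq_true, if_false, if_true,
    PySem.List.min?_id_cons, PySem.List.max?_id_cons,
    Int.reduceEq, neg_neg]
  all_goals try rw [pv_min_neg_fst]
  all_goals try rw [pv_min_neg_snd]
  all_goals first
    | rfl
    | (simp only [List.cons.injEq, Prod.mk.injEq]
       exact ⟨⟨by first | trivial | ring, by first | trivial | ring⟩, List.map_congr_left fun p _ => by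
         simp only [Prod.mk.injEq]; exact ⟨by first | trivial | ring, by first | trivial | ring⟩⟩)

-- ===== VERDICT (by name: the statement is the Claim_ definition above) =====
theorem transform_offsets_spec : Claim_equal_transform_offsets := by
  intro offsets rot_k mirror _ hpre
  unfold Spec_transform_offsets
  exact transform_offsets_eq offsets rot_k mirror hpre
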